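-- pv_equiv track=rewrite | github.com/DidiGG/Conjunos-Python | Python/Diferencia.py | diferencia_conjuntos
-- ===== SOURCE A (Python) =====
-- def diferencia_conjuntos(conjunto1, conjunto2, conjunto3):
--     # Paso 1: Calcular la unión de conjunto2 y conjunto3
--     union_BC = set(conjunto2)  # Empezar con conjunto2
--     for elemento in conjunto3:
--         union_BC.add(elemento)  # Añadir los elementos de conjunto3 a la unión
--
--     # Paso 2: Calcular la diferencia entre conjunto1 y la unión de conjunto2 y conjunto3
--     resultado = set(conjunto1)  # Empezar con conjunto1
--     for elemento in union_BC:
--         if elemento in resultado: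
--             resultado.discard(elemento)  # Eliminar los elementos que están en la unión
--
--     return resultado
-- ===== SOURCE B (Python) =====
-- def diferencia_conjuntos(conjunto1, conjunto2, conjunto3):
--     # One pass over conjunto1: keep elements absent from both other sets.
--     b2 = set(conjunto2)
--     b3 = set(conjunto3)
--     return {x for x in conjunto1 if x not in b2 and x not in b3}
-- ===== Notes on version B (the rewrite author's own statement) =====
-- stated objective: simpler
-- what changed: Instead of materializing the union of conjunto2 and conjunto3 and then discarding its members from a copy of conjunto1, B builds the two sets and filters conjunto1 in a single set comprehension, never constructing the union or mutating a result set.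
import Mathlib
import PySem

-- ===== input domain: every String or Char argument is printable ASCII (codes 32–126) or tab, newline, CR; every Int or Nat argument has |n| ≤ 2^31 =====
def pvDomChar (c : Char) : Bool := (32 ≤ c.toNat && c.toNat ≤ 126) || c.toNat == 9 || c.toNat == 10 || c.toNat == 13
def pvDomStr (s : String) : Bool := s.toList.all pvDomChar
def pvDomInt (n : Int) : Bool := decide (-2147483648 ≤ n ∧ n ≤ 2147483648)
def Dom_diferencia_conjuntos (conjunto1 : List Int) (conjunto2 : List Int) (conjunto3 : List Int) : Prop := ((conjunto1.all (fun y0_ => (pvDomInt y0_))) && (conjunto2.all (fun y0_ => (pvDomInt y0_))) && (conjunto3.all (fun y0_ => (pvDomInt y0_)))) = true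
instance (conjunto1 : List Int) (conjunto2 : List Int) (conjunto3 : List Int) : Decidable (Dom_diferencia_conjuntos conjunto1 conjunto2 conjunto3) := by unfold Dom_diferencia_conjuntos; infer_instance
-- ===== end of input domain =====

-- B replaces A's build-the-union-then-discard-from-a-copy with a single filtering
-- pass over conjunto1 against the two sets (objective: simpler).

-- ===== PORT A =====
def diferencia_conjuntos (conjunto1 : List Int) (conjunto2 : List Int) (conjunto3 : List Int) : List Int :=
  -- union_BC = set(conjunto2); for elemento in conjunto3: union_BC.add(elemento)
  let union_BC : PySem.Set Int :=
    conjunto3.foldl (fun s elemento => PySem.Set.add s elemento) (PySem.Set.ofList conjunto2)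
  -- resultado = set(conjunto1); for elemento in union_BC: if elemento in resultado: resultado.discard(elemento)
  -- (iteration over the set union_BC: the result does not depend on the order of removals)
  let resultado : PySem.Set Int :=
    union_BC.foldl
      (fun r elemento => if PySem.Set.contains r elemento then PySem.Set.discard r elemento else r)
      (PySem.Set.ofList conjunto1)
  resultado

-- ===== PORT B =====
def diferencia_conjuntos_alt (conjunto1 : List Int) (conjunto2 : List Int) (conjunto3 : List Int) : List Int :=
  let b2 : PySem.Set Int := PySem.Set.ofList conjunto2
  let b3 : PySem.Set Int := PySem.Set.ofList conjunto3
  -- {x for x in conjunto1 if x not in b2 and x not in b3}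
  PySem.Set.ofList
    (conjunto1.filter (fun x => !(PySem.Set.contains b2 x) && !(PySem.Set.contains b3 x)))

-- ===== PRECONDITION & SPEC =====
def Spec_diferencia_conjuntos (conjunto1 : List Int) (conjunto2 : List Int) (conjunto3 : List Int) (out : List Int) : Prop := out = diferencia_conjuntos_alt conjunto1 conjunto2 conjunto3
instance (conjunto1 : List Int) (conjunto2 : List Int) (conjunto3 : List Int) (out : List Int) : Decidable (Spec_diferencia_conjuntos conjunto1 conjunto2 conjunto3 out) := by unfold Spec_diferencia_conjuntos; infer_instance

-- ===== CLAIM (what is proved, stated in full; the proofs are below) =====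
def Claim_equal_diferencia_conjuntos : Prop := ∀ (conjunto1 : List Int) (conjunto2 : List Int) (conjunto3 : List Int), Dom_diferencia_conjuntos conjunto1 conjunto2 conjunto3 → Spec_diferencia_conjuntos conjunto1 conjunto2 conjunto3 (diferencia_conjuntos conjunto1 conjunto2 conjunto3)

-- ===== LEMMAS AND PROOFS =====

-- Discarding every element of u from s is filtering s by non-membership in u.
theorem pv_foldl_discard (u : List Int) (s : List Int) :
    u.foldl (fun r e => if PySem.Set.contains r e then PySem.Set.discard r e else r) s
      = s.filter (fun x => !(u.contains x)) := by
  induction u generalizing s with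
  | nil => simp
  | cons e u ih =>
    simp only [List.foldl_cons]
    have hstep : (if PySem.Set.contains s e then PySem.Set.discard s e else s)
        = s.filter (fun y => !(y == e)) := by
      by_cases h : PySem.Set.contains s e
      · rw [if_pos h]; rfl
      · rw [if_neg h, eq_comm, List.filter_eq_self]
        intro a ha
        simp only [Bool.not_eq_eq_eq_not, Bool.not_true, beq_eq_false_iff_ne]
        rintro rfl
        exact h (by simpa [PySem.Set.contains_eq_listContains, List.contains_iff_mem] using ha)
    rw [hstep, ih, List.filter_filter]
    apply List.filter_congr
    intro a _
    by_cases hae : a = e <;> simp [hae]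

-- set(filter p xs) = filter p (set(xs)) : first occurrences survive filtering.
theorem pv_ofList_filter (p : Int → Bool) (xs : List Int) :
    PySem.Set.ofList (xs.filter p) = (PySem.Set.ofList xs).filter p := by
  induction xs with
  | nil => simp [PySem.Set.ofList, PySem.Set.empty]
  | cons x xs ih =>
    by_cases hp : p x
    · rw [List.filter_cons_of_pos hp, PySem.Set.ofList_cons, PySem.Set.ofList_cons,
        ih]
      simp only [List.filter_cons_of_pos hp]
      congr 1
      simp [PySem.Set.discard, List.filter_filter, Bool.and_comm]
    · have hpx : p x = false := by simpa using hp
      rw [List.filter_cons_of_neg hp, PySem.Set.ofList_cons, ih]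
      simp only [List.filter_cons_of_neg hp]
      rw [PySem.Set.discard, List.filter_filter]
      apply List.filter_congr
      intro a _
      by_cases hax : a = x
      · subst hax; simp [hp]
      · simp [hax]

-- ===== VERDICT (by name: the statement is the Claim_ definition above) =====
theorem diferencia_conjuntos_spec : Claim_equal_diferencia_conjuntos := by
  intro c1 c2 c3 _
  unfold Spec_diferencia_conjuntos
  simp only [diferencia_conjuntos, diferencia_conjuntos_alt]
  rw [pv_foldl_discard, pv_ofList_filter]
  apply List.filter_congr
  intro a _
  have hu : (c3.foldl (fun s e => PySem.Set.add s e) (PySem.Set.ofList c2))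
      = PySem.Set.update (PySem.Set.ofList c2) c3 := rfl
  rw [hu]
  simp only [Bool.not_eq_eq_eq_not, Bool.not_and]
  by_cases h : a ∈ PySem.Set.update (PySem.Set.ofList c2) c3
  · rw [PySem.Set.mem_update, PySem.Set.mem_ofList] at h
    rcases h with h | h <;>
      simp [PySem.Set.mem_update, PySem.Set.mem_ofList, h,
        PySem.Set.contains_eq_listContains]
  · rw [PySem.Set.mem_update, PySem.Set.mem_ofList] at h
    push Not at h
    simp [PySem.Set.mem_update, PySem.Set.mem_ofList, h.1, h.2,
      PySem.Set.contains_eq_listContains]
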